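-- pv_equiv track=rewrite | github.com/qtov/an1sem2-cs.ubb | AG/lab4/dominating_set.py | min_dom_len
-- ===== SOURCE A (Python) =====
-- def grade(matrix_a, node):
-- 	"""
-- 	input: matrice de adiacenta, varful(int) pentru care se calculeaza gradul unui varf
-- 	output: graful varfului
-- 	comportament necunoscut pentru alte date de intrare
-- 	"""
-- 	_num_edges = 0
-- 	for i in range(len(matrix_a)):
-- 		if (matrix_a[node][i] == 1):
-- 			_num_edges += 1
-- 	return _num_edges
--
-- def delete_all_line(matrix_a, line):
-- 	"""
-- 	input: matrice de adiacenta, linie(int)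
-- 	output: -
-- 	seteaza 0 pentru linie "line"
-- 	comportament necunoscut pentru alte date de intrare
-- 	"""
-- 	for i in range(len(matrix_a)):
-- 		matrix_a[line][i] = 0
--
-- def all_zero(matrix_a):
-- 	"""
-- 	input: matrice de adiacenta
-- 	output: boolean (true daca matricea e plina de 0, 1 altfel)
-- 	comportament necunoscut pentru alte date de intrare
-- 	"""
-- 	for i in range(len(matrix_a)):
-- 		for j in range(len(matrix_a)):
-- 			if (matrix_a[i][j] == 1):
-- 				return False
-- 	return True
--
-- def min_dom_len(matrix_a_base):
-- 	"""
-- 	input: matrice de adiacenta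
-- 	output: int (cardinalul unei multimi externe stabile minime)
-- 	comportament necunoscut pentru alte date de intrare
-- 	"""
-- 	num_nodes = len(matrix_a_base)
-- 	matrix_a = [[0 for i in range(num_nodes)] for x in range(num_nodes)]
-- 	matrix_b = [[0 for i in range(num_nodes)] for x in range(num_nodes)]
-- 	# doua matrice pentru reprezentarea grafului bipartit
-- 	list_b = [i for i in range(num_nodes)]
-- 	# lista pentru stergerea conexiunilor
--
-- 	for i in range(num_nodes):
-- 		for j in range(num_nodes):
-- 			matrix_a[i][j] = matrix_a_base[i][j]
--
-- 	for i in range(num_nodes):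
-- 		matrix_a[i][i] = 1
-- 	# diagonala principala initializata cu 1 (un varf este adiacent cu el insusi)
--
-- 	for i in range(num_nodes):
-- 		for j in range(num_nodes):
-- 			matrix_b[i][j] = matrix_a[i][j]
--
--
-- 	min_dom = 0 # contor
-- 	while (not all_zero(matrix_a)):
-- 		maximum = 0
-- 		pos = -1
--
-- 		# gasirea unui varf cu cel mai mare graf
-- 		for i in reversed(range(num_nodes)):
-- 			if (maximum < grade(matrix_a, i)):
-- 				maximum = grade(matrix_a, i)
-- 				pos = i
--
-- 		# stergerea din lista de conexiuni si actualizarea matricii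
-- 		for i in reversed(list_b):
-- 			if (matrix_a[pos][i] == 1 and i in list_b):
-- 				delete_all_line(matrix_b, i)
-- 				list_b.remove(i)
--
-- 		# actualizarea matricii
-- 		for i in range(num_nodes):
-- 			for j in range(num_nodes):
-- 				if (matrix_a[i][j] == 1 and not j in list_b):
-- 					matrix_a[i][j] = 0
--
-- 		min_dom += 1
-- 	return min_dom
-- ===== SOURCE B (Python) =====
-- def min_dom_len(matrix_a_base):
--     n = len(matrix_a_base)
--     # closed adjacency as a boolean matrix (a vertex dominates itself)
--     adj = [[matrix_a_base[i][j] == 1 or i == j for j in range(n)] for i in range(n)]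
--     S = list(range(n))                     # columns (vertices) not yet dominated
--     deg = [sum(1 for j in range(n) if adj[i][j]) for i in range(n)]
--     count = 0
--     while True:
--         best = 0
--         pos = -1
--         for i in range(n):
--             if deg[i] >= best and deg[i] > 0:
--                 best = deg[i]
--                 pos = i
--         if pos == -1:
--             return count
--         removed = [j for j in S if adj[pos][j]]
--         S = [j for j in S if not adj[pos][j]]
--         deg = [deg[i] - sum(1 for j in removed if adj[i][j]) for i in range(n)]
--         count += 1
-- ===== Notes on version B (the rewrite author's own statement) =====
-- stated objective: faster
-- what changed: Instead of rescanning the whole matrix every round (all_zero check, grade() recomputed twice per candidate, and rewriting the matrix), B keeps the list of not-yet-dominated columns and a degree array that it updates incrementally by the columns removed in each round.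
import Mathlib
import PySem

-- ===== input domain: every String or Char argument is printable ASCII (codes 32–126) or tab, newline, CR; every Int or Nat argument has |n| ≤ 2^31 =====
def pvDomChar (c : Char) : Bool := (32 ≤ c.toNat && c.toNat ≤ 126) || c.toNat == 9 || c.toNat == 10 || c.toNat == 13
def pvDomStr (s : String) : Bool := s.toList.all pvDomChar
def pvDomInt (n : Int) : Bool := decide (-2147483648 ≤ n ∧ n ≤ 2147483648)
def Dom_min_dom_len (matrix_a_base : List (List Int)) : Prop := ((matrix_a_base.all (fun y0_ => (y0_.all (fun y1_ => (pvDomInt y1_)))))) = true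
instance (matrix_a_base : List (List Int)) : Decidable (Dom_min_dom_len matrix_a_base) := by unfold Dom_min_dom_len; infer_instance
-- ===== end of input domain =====

-- B replaces A's per-round full-matrix rescans (all_zero, twice-recomputed grade, rewriting the
-- matrix) by a remaining-column list with incrementally maintained degrees; return values proved equal.
-- A only mutates local copies, so return-value equivalence is full equivalence.

-- ===== PORT A =====

-- matrix[i][j] = v  (mutation of one cell of a list-of-lists)
def pvSetAt (m : List (List Int)) (i j : Nat) (v : Int) : List (List Int) :=
  m.set i ((m.getD i []).set j v)

-- grade(matrix_a, node)
def pvGrade (ma : List (List Int)) (node : Nat) : Int :=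
  (List.range ma.length).foldl
    (fun acc i => if (ma.getD node []).getD i 0 == 1 then acc + 1 else acc) 0

-- delete_all_line(matrix_b, line)
def pvDeleteAllLine (mb : List (List Int)) (line : Nat) : List (List Int) :=
  (List.range mb.length).foldl (fun m i => pvSetAt m line i 0) mb

-- all_zero(matrix_a)  (early `return False` on the first 1 ≡ .all)
def pvAllZero (ma : List (List Int)) : Bool :=
  (List.range ma.length).all
    (fun i => (List.range ma.length).all (fun j => !((ma.getD i []).getD j 0 == 1)))

-- for i in reversed(range(num_nodes)): if maximum < grade(matrix_a, i): maximum, pos = grade(matrix_a, i), i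
def pvFindPos (ma : List (List Int)) (n : Nat) : Int × Int :=
  ((List.range n).reverse).foldl
    (fun (s : Int × Int) i => if s.1 < pvGrade ma i then (pvGrade ma i, (i : Int)) else s)
    (0, -1)

-- for i in reversed(list_b): if matrix_a[pos][i] == 1 and i in list_b: delete_all_line(matrix_b, i); list_b.remove(i)
-- Python's live reversed() iterator, removing only the element just yielded (elements distinct),
-- traverses exactly the snapshot list_b.reverse; list.remove = erase of the first occurrence.
def pvRemovalPass (ma : List (List Int)) (pos : Nat) (mb : List (List Int)) (lb : List Nat) :
    List (List Int) × List Nat :=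
  lb.reverse.foldl
    (fun (s : List (List Int) × List Nat) i =>
      if ((ma.getD pos []).getD i 0 == 1) && s.2.contains i
      then (pvDeleteAllLine s.1 i, s.2.erase i) else s)
    (mb, lb)

-- for i in range(n): for j in range(n): if matrix_a[i][j] == 1 and not j in list_b: matrix_a[i][j] = 0
def pvUpdateMa (n : Nat) (lb : List Nat) (ma : List (List Int)) : List (List Int) :=
  (List.range n).foldl
    (fun m i => (List.range n).foldl
      (fun m j => if ((m.getD i []).getD j 0 == 1) && !(lb.contains j)
                  then pvSetAt m i j 0 else m) m) ma

-- the while loop (fuel n+1 is enough: every executed pass empties at least one column)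
def pvLoopA : Nat → Nat → List (List Int) → List (List Int) → List Nat → Int → Int
  | _, 0, _, _, _, cnt => cnt
  | n, fuel+1, ma, mb, lb, cnt =>
    if pvAllZero ma then cnt
    else
      let pos := (pvFindPos ma n).2.toNat
      let st := pvRemovalPass ma pos mb lb
      pvLoopA n fuel (pvUpdateMa n st.2 ma) st.1 st.2 (cnt + 1)

-- matrix_a = [[0]*n]*n (fresh)
def pvZeros (n : Nat) : List (List Int) :=
  (List.range n).map (fun _ => (List.range n).map (fun _ => (0 : Int)))

-- for i in range(n): for j in range(n): dst[i][j] = src[i][j]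
def pvCopyInto (n : Nat) (src dst : List (List Int)) : List (List Int) :=
  (List.range n).foldl
    (fun m i => (List.range n).foldl
      (fun m j => pvSetAt m i j ((src.getD i []).getD j 0)) m) dst

-- for i in range(n): matrix_a[i][i] = 1
def pvSetDiag (n : Nat) (m0 : List (List Int)) : List (List Int) :=
  (List.range n).foldl (fun m i => pvSetAt m i i 1) m0

def min_dom_len (matrix_a_base : List (List Int)) : Int :=
  let n := matrix_a_base.length
  let ma := pvSetDiag n (pvCopyInto n matrix_a_base (pvZeros n))
  let mb := pvCopyInto n ma (pvZeros n)
  pvLoopA n (n + 1) ma mb (List.range n) 0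

-- ===== PORT B =====

-- adj[i][j]
def pvAdjGet (adj : List (List Bool)) (i j : Nat) : Bool := (adj.getD i []).getD j false

-- adj = [[matrix_a_base[i][j] == 1 or i == j for j in range(n)] for i in range(n)]
def pvAdjInit (matrix_a_base : List (List Int)) (n : Nat) : List (List Bool) :=
  (List.range n).map
    (fun i => (List.range n).map
      (fun j => ((matrix_a_base.getD i []).getD j 0 == 1) || (i == j)))

-- deg = [sum(1 for j in range(n) if adj[i][j]) for i in range(n)]
def pvDegInit (n : Nat) (adj : List (List Bool)) : List Int :=
  (List.range n).map (fun i => ((List.range n).countP (fun j => pvAdjGet adj i j) : Int))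

-- for i in range(n): if deg[i] >= best and deg[i] > 0: best, pos = deg[i], i
def pvBestPos (n : Nat) (deg : List Int) : Int × Int :=
  (List.range n).foldl
    (fun (s : Int × Int) i =>
      if s.1 ≤ deg.getD i 0 ∧ 1 ≤ deg.getD i 0 then (deg.getD i 0, (i : Int)) else s)
    (0, -1)

def pvLoopB : Nat → List (List Bool) → Nat → List Int → List Nat → Int → Int
  | _, _, 0, _, _, cnt => cnt
  | n, adj, fuel+1, deg, S, cnt =>
    if (pvBestPos n deg).2 == -1 then cnt
    else
      let pos := (pvBestPos n deg).2.toNat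
      let removed := S.filter (fun j => pvAdjGet adj pos j)
      pvLoopB n adj fuel
        ((List.range n).map (fun i => deg.getD i 0 - (removed.countP (fun j => pvAdjGet adj i j) : Int)))
        (S.filter (fun j => !pvAdjGet adj pos j))
        (cnt + 1)

def min_dom_len_alt (matrix_a_base : List (List Int)) : Int :=
  let n := matrix_a_base.length
  pvLoopB n (pvAdjInit matrix_a_base n) (n + 1)
    (pvDegInit n (pvAdjInit matrix_a_base n)) (List.range n) 0

-- ===== PRECONDITION & SPEC =====
-- Pre_ excludes exactly the ragged matrices (some row shorter than the number of rows), on which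
-- A raises IndexError while reading matrix_a_base[i][j] for i, j < len(matrix_a_base).
def Pre_min_dom_len (matrix_a_base : List (List Int)) : Prop :=
  ∀ row ∈ matrix_a_base, matrix_a_base.length ≤ row.length
instance (matrix_a_base : List (List Int)) : Decidable (Pre_min_dom_len matrix_a_base) := by
  unfold Pre_min_dom_len; infer_instance

def pvWitness_min_dom_len : List (List Int) := [[0, 1], [1, 0]]

def Spec_min_dom_len (matrix_a_base : List (List Int)) (out : Int) : Prop :=
  out = min_dom_len_alt matrix_a_base
instance (matrix_a_base : List (List Int)) (out : Int) : Decidable (Spec_min_dom_len matrix_a_base out) := by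
  unfold Spec_min_dom_len; infer_instance

-- ===== CLAIM (what is proved, stated in full; the proofs are below) =====
def Claim_equal_min_dom_len : Prop := ∀ (matrix_a_base : List (List Int)), Dom_min_dom_len matrix_a_base → Pre_min_dom_len matrix_a_base → Spec_min_dom_len matrix_a_base (min_dom_len matrix_a_base)

-- ===== LEMMAS AND PROOFS =====

-- the closed-adjacency predicate both programs effectively test
def pvCA (base : List (List Int)) (i j : Nat) : Bool :=
  ((base.getD i []).getD j 0 == 1) || (i == j)

lemma pv_contains_iff (l : List Nat) (a : Nat) : l.contains a = true ↔ a ∈ l := by simp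

lemma pv_getD_set_self {α : Type} (l : List α) (i : Nat) (x d : α) (h : i < l.length) :
    (l.set i x).getD i d = x := by
  simp [List.getD, h]

lemma pv_getD_set_ne {α : Type} (l : List α) (i k : Nat) (x d : α) (h : i ≠ k) :
    (l.set i x).getD k d = l.getD k d := by
  simp [List.getD, List.getElem?_set_ne h]

lemma pv_set_getD_self {α : Type} (l : List α) (i : Nat) (d : α) (h : i < l.length) :
    l.set i (l.getD i d) = l := by
  rw [List.getD_eq_getElem l d h]; exact List.set_getElem_self ..

lemma pv_range_reverse_succ (n : Nat) :
    (List.range (n + 1)).reverse = n :: (List.range n).reverse := by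
  simp [List.range_succ]

-- a countP over range n of "q j && j ∈ S" is a countP over S (S duplicate-free, bounded by n)
lemma pv_countRange (n : Nat) (S : List Nat) (q : Nat → Bool)
    (hnd : S.Nodup) (hb : ∀ j ∈ S, j < n) :
    (List.range n).countP (fun j => q j && S.contains j) = S.countP q := by
  rw [List.countP_eq_length_filter, List.countP_eq_length_filter]
  apply List.Perm.length_eq
  refine (List.perm_ext_iff_of_nodup (List.nodup_range.filter _) (hnd.filter _)).mpr ?_
  intro a
  simp only [List.mem_filter, List.mem_range, Bool.and_eq_true, pv_contains_iff]
  constructor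
  · rintro ⟨-, hq, hs⟩; exact ⟨hs, hq⟩
  · rintro ⟨hs, hq⟩; exact ⟨hb a hs, hq, hs⟩

-- characterization of A's downward strict-argmax fold
lemma pv_downFoldChar (f : Nat → Int) (n : Nat) (b p : Int) :
    ((∀ i, i < n → f i ≤ b) ∧
      ((List.range n).reverse).foldl
        (fun (s : Int × Int) i => if s.1 < f i then (f i, (i : Int)) else s) (b, p) = (b, p))
    ∨ (∃ k, k < n ∧ b < f k ∧
      ((List.range n).reverse).foldl
        (fun (s : Int × Int) i => if s.1 < f i then (f i, (i : Int)) else s) (b, p) = (f k, (k : Int)) ∧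
      (∀ j, j < n → f j ≤ f k) ∧ (∀ j, k < j → j < n → f j < f k)) := by
  induction n generalizing b p with
  | zero => left; exact ⟨fun i hi => absurd hi (Nat.not_lt_zero i), rfl⟩
  | succ n IH =>
    rw [pv_range_reverse_succ, List.foldl_cons]
    by_cases hbn : b < f n
    · rw [show (if (b, p).1 < f n then (f n, (n : Int)) else (b, p)) = (f n, (n : Int)) from if_pos hbn]
      rcases IH (f n) (n : Int) with ⟨h1, h2⟩ | ⟨k, hk, hbk, heq, hle, hlt⟩
      · right
        refine ⟨n, Nat.lt_succ_self n, hbn, h2, ?_, ?_⟩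
        · intro j hj
          rcases Nat.lt_succ_iff_lt_or_eq.mp hj with h | h
          · exact h1 j h
          · exact h ▸ le_refl _
        · intro j h1' h2'; omega
      · right
        refine ⟨k, by omega, lt_trans hbn hbk, heq, ?_, ?_⟩
        · intro j hj
          rcases Nat.lt_succ_iff_lt_or_eq.mp hj with h | h
          · exact hle j h
          · exact h ▸ le_of_lt hbk
        · intro j hkj hj
          rcases Nat.lt_succ_iff_lt_or_eq.mp hj with h | h
          · exact hlt j hkj h
          · exact h ▸ hbk
    · rw [show (if (b, p).1 < f n then (f n, (n : Int)) else (b, p)) = (b, p) from if_neg hbn]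
      rcases IH b p with ⟨h1, h2⟩ | ⟨k, hk, hbk, heq, hle, hlt⟩
      · left
        refine ⟨fun i hi => ?_, h2⟩
        rcases Nat.lt_succ_iff_lt_or_eq.mp hi with h | h
        · exact h1 i h
        · exact h ▸ le_of_not_gt hbn
      · right
        refine ⟨k, by omega, hbk, heq, ?_, ?_⟩
        · intro j hj
          rcases Nat.lt_succ_iff_lt_or_eq.mp hj with h | h
          · exact hle j h
          · exact h ▸ le_of_lt (lt_of_le_of_lt (le_of_not_gt hbn) hbk)
        · intro j hkj hj
          rcases Nat.lt_succ_iff_lt_or_eq.mp hj with h | h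
          · exact hlt j hkj h
          · exact h ▸ lt_of_le_of_lt (le_of_not_gt hbn) hbk

-- characterization of B's upward ≥-argmax fold
lemma pv_upFoldChar (f : Nat → Int) (n : Nat) :
    ((∀ i, i < n → f i < 1) ∧
      (List.range n).foldl
        (fun (s : Int × Int) i => if s.1 ≤ f i ∧ 1 ≤ f i then (f i, (i : Int)) else s) (0, -1) = (0, -1))
    ∨ (∃ k, k < n ∧ 1 ≤ f k ∧
      (List.range n).foldl
        (fun (s : Int × Int) i => if s.1 ≤ f i ∧ 1 ≤ f i then (f i, (i : Int)) else s) (0, -1) = (f k, (k : Int)) ∧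
      (∀ j, j < n → f j ≤ f k) ∧ (∀ j, k < j → j < n → f j < f k)) := by
  induction n with
  | zero => left; exact ⟨fun i hi => absurd hi (Nat.not_lt_zero i), rfl⟩
  | succ n IH =>
    rw [List.range_succ, List.foldl_append, List.foldl_cons, List.foldl_nil]
    rcases IH with ⟨hall, heq⟩ | ⟨k, hk, h1k, heq, hle, hlt⟩
    · rw [heq]
      by_cases h1n : 1 ≤ f n
      · rw [show (if (0:Int) ≤ f n ∧ 1 ≤ f n then (f n, (n : Int)) else ((0:Int), (-1:Int)))
              = (f n, (n : Int)) from if_pos ⟨by omega, h1n⟩]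
        right
        refine ⟨n, Nat.lt_succ_self n, h1n, rfl, ?_, ?_⟩
        · intro j hj
          rcases Nat.lt_succ_iff_lt_or_eq.mp hj with h | h
          · have := hall j h; omega
          · exact h ▸ le_refl _
        · intro j h1' h2'; omega
      · rw [show (if (0:Int) ≤ f n ∧ 1 ≤ f n then (f n, (n : Int)) else ((0:Int), (-1:Int)))
              = ((0:Int), (-1:Int)) from if_neg (fun h => h1n h.2)]
        left
        refine ⟨fun i hi => ?_, rfl⟩
        rcases Nat.lt_succ_iff_lt_or_eq.mp hi with h | h
        · exact hall i h
        · rw [h]; omega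
    · rw [heq]
      by_cases hx : f k ≤ f n
      · rw [show (if f k ≤ f n ∧ 1 ≤ f n then (f n, (n : Int)) else (f k, (k : Int)))
              = (f n, (n : Int)) from if_pos ⟨hx, le_trans h1k hx⟩]
        right
        refine ⟨n, Nat.lt_succ_self n, le_trans h1k hx, rfl, ?_, ?_⟩
        · intro j hj
          rcases Nat.lt_succ_iff_lt_or_eq.mp hj with h | h
          · exact le_trans (hle j h) hx
          · exact h ▸ le_refl _
        · intro j h1' h2'; omega
      · rw [show (if f k ≤ f n ∧ 1 ≤ f n then (f n, (n : Int)) else (f k, (k : Int)))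
              = (f k, (k : Int)) from if_neg (fun h => hx h.1)]
        right
        refine ⟨k, by omega, h1k, rfl, ?_, ?_⟩
        · intro j hj
          rcases Nat.lt_succ_iff_lt_or_eq.mp hj with h | h
          · exact hle j h
          · exact h ▸ le_of_lt (lt_of_not_ge hx)
        · intro j hkj hj
          rcases Nat.lt_succ_iff_lt_or_eq.mp hj with h | h
          · exact hlt j hkj h
          · exact h ▸ lt_of_not_ge hx

-- A's reversed-snapshot removal pass filters list_b
lemma pv_removeFold (cond : Nat → Bool) :
    ∀ (r : List Nat) (st : List (List Int)) (cur : List Nat), cur.Nodup → r.Nodup →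
      (∀ i ∈ r, i ∈ cur) →
      (r.foldl
        (fun (s : List (List Int) × List Nat) i =>
          if cond i && s.2.contains i then (pvDeleteAllLine s.1 i, s.2.erase i) else s)
        (st, cur)).2
      = cur.filter (fun i => !(cond i && r.contains i)) := by
  intro r
  induction r with
  | nil =>
    intro st cur hnd _ _
    simp
  | cons a r IH =>
    intro st cur hnd hrnd hmem
    have ha : a ∈ cur := hmem a (List.mem_cons_self ..)
    have hac : cur.contains a = true := (pv_contains_iff cur a).mpr ha
    have hanr : a ∉ r := (List.nodup_cons.mp hrnd).1
    rw [List.foldl_cons]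
    by_cases hca : cond a = true
    · have hcnd : (cond a && cur.contains a) = true := by
        simp [hca]
        exact ha
      rw [show (if cond a && (st, cur).2.contains a
              then (pvDeleteAllLine (st, cur).1 a, (st, cur).2.erase a) else (st, cur))
            = (pvDeleteAllLine st a, cur.erase a) from if_pos hcnd]
      rw [IH (pvDeleteAllLine st a) (cur.erase a) (hnd.erase a) hrnd.of_cons
            (fun i hi => (List.mem_erase_of_ne (fun h => hanr (by rw [← h]; exact hi))).mpr
              (hmem i (List.mem_cons_of_mem a hi)))]
      have herase : cur.erase a = cur.filter (fun x => x != a) := by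
        rw [List.Nodup.erase_eq_filter]
        exact hnd
      rw [herase, List.filter_filter]
      apply List.filter_congr
      intro x hx
      by_cases hxa : x = a
      · subst hxa; simp [hca]
      · simp [hxa]
    · have hca' : cond a = false := by rw [← Bool.not_eq_true]; exact hca
      rw [show (if cond a && (st, cur).2.contains a
              then (pvDeleteAllLine (st, cur).1 a, (st, cur).2.erase a) else (st, cur))
            = (st, cur) from if_neg (by rw [hca']; simp)]
      rw [IH st cur hnd hrnd.of_cons (fun i hi => hmem i (List.mem_cons_of_mem a hi))]
      apply List.filter_congr
      intro x hx
      by_cases hxa : x = a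
      · subst hxa; simp [hca']
      · simp [hxa]

-- row-local conditional-zeroing fold (the inner loop of the matrix update): length and entries
lemma pv_rowUpdate (Kb : List Nat) (K : Nat) (row : List Int) (hK : K ≤ row.length) :
    (((List.range K).foldl
        (fun r j => if (r.getD j 0 == 1) && !(Kb.contains j) then r.set j 0 else r) row).length
      = row.length) ∧
    (∀ j, ((List.range K).foldl
        (fun r j => if (r.getD j 0 == 1) && !(Kb.contains j) then r.set j 0 else r) row).getD j 0
      = if j < K ∧ ((row.getD j 0 == 1) && !(Kb.contains j)) = true then 0 else row.getD j 0) := by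
  induction K with
  | zero => refine ⟨rfl, fun j => ?_⟩; simp
  | succ K IH =>
    have hK' : K ≤ row.length := by omega
    obtain ⟨IHlen, IHget⟩ := IH hK'
    rw [List.range_succ, List.foldl_append, List.foldl_cons, List.foldl_nil]
    set F := (List.range K).foldl
        (fun r j => if (r.getD j 0 == 1) && !(Kb.contains j) then r.set j 0 else r) row with hF
    have hFK : F.getD K 0 = row.getD K 0 := by
      rw [IHget K]; simp
    by_cases hP : ((row.getD K 0 == 1) && !(Kb.contains K)) = true
    · rw [show (if (F.getD K 0 == 1) && !(Kb.contains K) then F.set K 0 else F) = F.set K 0 from by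
          rw [hFK]; exact if_pos hP]
      constructor
      · rw [List.length_set, IHlen]
      · intro j
        by_cases hjK : j = K
        · subst hjK
          rw [pv_getD_set_self _ _ _ _ (by rw [IHlen]; omega)]
          rw [if_pos ⟨Nat.lt_succ_self j, hP⟩]
        · rw [pv_getD_set_ne _ _ _ _ _ (fun h => hjK h.symm), IHget j]
          exact if_congr ⟨fun ⟨h1, h2⟩ => ⟨by omega, h2⟩, fun ⟨h1, h2⟩ => ⟨by omega, h2⟩⟩ rfl rfl
    · rw [show (if (F.getD K 0 == 1) && !(Kb.contains K) then F.set K 0 else F) = F from by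
          rw [hFK]; exact if_neg (by simp_all)]
      refine ⟨IHlen, fun j => ?_⟩
      rw [IHget j]
      by_cases hjK : j = K
      · subst hjK
        rw [if_neg (fun h => absurd h.1 (lt_irrefl j)), if_neg (fun h => hP h.2)]
      · exact if_congr ⟨fun ⟨h1, h2⟩ => ⟨by omega, h2⟩, fun ⟨h1, h2⟩ => ⟨by omega, h2⟩⟩ rfl rfl

-- row-local unconditional-write fold (the inner loop of the copies): length and entries
lemma pv_rowCopy (v : Nat → Int) (K : Nat) (row : List Int) (hK : K ≤ row.length) :
    (((List.range K).foldl (fun r j => r.set j (v j)) row).length = row.length) ∧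
    (∀ j, ((List.range K).foldl (fun r j => r.set j (v j)) row).getD j 0
      = if j < K then v j else row.getD j 0) := by
  induction K with
  | zero => refine ⟨rfl, fun j => ?_⟩; simp
  | succ K IH =>
    have hK' : K ≤ row.length := by omega
    obtain ⟨IHlen, IHget⟩ := IH hK'
    rw [List.range_succ, List.foldl_append, List.foldl_cons, List.foldl_nil]
    constructor
    · rw [List.length_set, IHlen]
    · intro j
      by_cases hjK : j = K
      · subst hjK
        rw [pv_getD_set_self _ _ _ _ (by rw [IHlen]; omega), if_pos (Nat.lt_succ_self j)]
      · rw [pv_getD_set_ne _ _ _ _ _ (fun h => hjK h.symm), IHget j]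
        by_cases hj : j < K
        · rw [if_pos hj, if_pos (by omega)]
        · rw [if_neg hj, if_neg (fun h => hjK (by omega))]

-- an inner fold of conditional pvSetAt on row i is the row-local fold on that row
lemma pv_innerUpdate (Kb : List Nat) (i : Nat) :
    ∀ (js : List Nat) (m : List (List Int)), i < m.length →
      js.foldl
        (fun m j => if ((m.getD i []).getD j 0 == 1) && !(Kb.contains j)
                    then pvSetAt m i j 0 else m) m
      = m.set i (js.foldl
          (fun r j => if (r.getD j 0 == 1) && !(Kb.contains j) then r.set j 0 else r)
          (m.getD i [])) := by
  intro js
  induction js with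
  | nil => intro m h; exact (congrArg _ rfl).trans (pv_set_getD_self m i [] h).symm
  | cons j js IH =>
    intro m h
    rw [List.foldl_cons, List.foldl_cons]
    by_cases hP : (((m.getD i []).getD j 0 == 1) && !(Kb.contains j)) = true
    · rw [if_pos hP, if_pos hP]
      have h' : i < (pvSetAt m i j 0).length := by
        unfold pvSetAt; rw [List.length_set]; exact h
      rw [IH (pvSetAt m i j 0) h']
      unfold pvSetAt
      rw [pv_getD_set_self _ _ _ _ h, List.set_set]
    · rw [if_neg hP, if_neg hP]
      exact IH m h

-- an inner fold of unconditional pvSetAt on row i is the row-local fold on that row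
lemma pv_innerCopy (v : Nat → Int) (i : Nat) :
    ∀ (js : List Nat) (m : List (List Int)), i < m.length →
      js.foldl (fun m j => pvSetAt m i j (v j)) m
      = m.set i (js.foldl (fun r j => r.set j (v j)) (m.getD i [])) := by
  intro js
  induction js with
  | nil => intro m h; exact (pv_set_getD_self m i [] h).symm
  | cons j js IH =>
    intro m h
    rw [List.foldl_cons, List.foldl_cons]
    have h' : i < (pvSetAt m i j (v j)).length := by
      unfold pvSetAt; rw [List.length_set]; exact h
    rw [IH (pvSetAt m i j (v j)) h']
    unfold pvSetAt
    rw [pv_getD_set_self _ _ _ _ h, List.set_set]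

-- a fold over rows of whole-row rewrites: length and rows
lemma pv_outerFold (g : List (List Int) → Nat → List (List Int)) (W : Nat → List Int → List Int)
    (hg : ∀ m i, i < m.length → g m i = m.set i (W i (m.getD i []))) (K : Nat) :
    ∀ (m : List (List Int)), K ≤ m.length →
      (((List.range K).foldl g m).length = m.length) ∧
      (∀ k, ((List.range K).foldl g m).getD k []
        = if k < K then W k (m.getD k []) else m.getD k []) := by
  induction K with
  | zero => intro m _; refine ⟨rfl, fun k => ?_⟩; simp
  | succ K IH =>
    intro m hK
    have hK' : K ≤ m.length := by omega
    obtain ⟨IHlen, IHget⟩ := IH m hK'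
    rw [List.range_succ, List.foldl_append, List.foldl_cons, List.foldl_nil]
    set F := (List.range K).foldl g m with hF
    have hKF : K < F.length := by omega
    rw [hg F K hKF]
    have hFK : F.getD K [] = m.getD K [] := by rw [IHget K]; simp
    constructor
    · rw [List.length_set, IHlen]
    · intro k
      by_cases hkK : k = K
      · subst hkK
        rw [pv_getD_set_self _ _ _ _ hKF, hFK, if_pos (Nat.lt_succ_self k)]
      · rw [pv_getD_set_ne _ _ _ _ _ (fun h => hkK h.symm), IHget k]
        by_cases hk : k < K
        · rw [if_pos hk, if_pos (by omega)]
        · rw [if_neg hk, if_neg (fun h => hkK (by omega))]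

-- characterization of pvUpdateMa
lemma pv_updateChar (Kb : List Nat) (n : Nat) (ma : List (List Int)) (hlen : ma.length = n)
    (hrow : ∀ i, i < n → (ma.getD i []).length = n) :
    ((pvUpdateMa n Kb ma).length = n) ∧
    (∀ i, i < n → ((pvUpdateMa n Kb ma).getD i []).length = n) ∧
    (∀ i j, i < n → j < n → ((pvUpdateMa n Kb ma).getD i []).getD j 0
      = if (((ma.getD i []).getD j 0 == 1) && !(Kb.contains j)) = true then 0
        else (ma.getD i []).getD j 0) := by
  have hg : ∀ (m : List (List Int)) (i : Nat), i < m.length →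
      (List.range n).foldl
        (fun m j => if ((m.getD i []).getD j 0 == 1) && !(Kb.contains j)
                    then pvSetAt m i j 0 else m) m
      = m.set i ((List.range n).foldl
          (fun r j => if (r.getD j 0 == 1) && !(Kb.contains j) then r.set j 0 else r)
          (m.getD i [])) :=
    fun m i h => pv_innerUpdate Kb i (List.range n) m h
  have H := pv_outerFold
    (fun m i => (List.range n).foldl
      (fun m j => if ((m.getD i []).getD j 0 == 1) && !(Kb.contains j)
                  then pvSetAt m i j 0 else m) m)
    (fun i row => (List.range n).foldl
      (fun r j => if (r.getD j 0 == 1) && !(Kb.contains j) then r.set j 0 else r) row)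
    hg n ma (le_of_eq hlen.symm)
  refine ⟨hlen ▸ H.1, ?_, ?_⟩
  · intro i hi
    rw [show (pvUpdateMa n Kb ma).getD i [] = _ from H.2 i, if_pos hi,
      (pv_rowUpdate Kb n (ma.getD i []) (le_of_eq (hrow i hi).symm)).1, hrow i hi]
  · intro i j hi hj
    rw [show (pvUpdateMa n Kb ma).getD i [] = _ from H.2 i, if_pos hi,
      (pv_rowUpdate Kb n (ma.getD i []) (le_of_eq (hrow i hi).symm)).2 j]
    by_cases hP : (((ma.getD i []).getD j 0 == 1) && !(Kb.contains j)) = true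
    · rw [if_pos ⟨hj, hP⟩, if_pos hP]
    · rw [if_neg (fun h => hP h.2), if_neg hP]

-- characterization of the initial matrix_a (copy of the base with 1s on the diagonal)
lemma pv_initChar (base : List (List Int)) (n : Nat) :
    ((pvSetDiag n (pvCopyInto n base (pvZeros n))).length = n) ∧
    (∀ i, i < n → ((pvSetDiag n (pvCopyInto n base (pvZeros n))).getD i []).length = n) ∧
    (∀ i j, i < n → j < n → ((pvSetDiag n (pvCopyInto n base (pvZeros n))).getD i []).getD j 0
      = if i = j then 1 else (base.getD i []).getD j 0) := by
  -- the zero matrix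
  have hzlen : (pvZeros n).length = n := by unfold pvZeros; simp
  have hzrow : ∀ i, i < n → (pvZeros n).getD i [] = (List.range n).map (fun _ => (0 : Int)) := by
    intro i hi; unfold pvZeros; exact PySem.List.getD_map_range _ n i [] hi
  have hzrowlen : ∀ i, i < n → ((pvZeros n).getD i []).length = n := by
    intro i hi; rw [hzrow i hi]; simp
  -- the copy
  have hgc : ∀ (m : List (List Int)) (i : Nat), i < m.length →
      (List.range n).foldl (fun m j => pvSetAt m i j ((base.getD i []).getD j 0)) m
      = m.set i ((List.range n).foldl
          (fun r j => r.set j ((base.getD i []).getD j 0)) (m.getD i [])) :=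
    fun m i h => pv_innerCopy (fun j => (base.getD i []).getD j 0) i (List.range n) m h
  have HC := pv_outerFold
    (fun m i => (List.range n).foldl (fun m j => pvSetAt m i j ((base.getD i []).getD j 0)) m)
    (fun i row => (List.range n).foldl (fun r j => r.set j ((base.getD i []).getD j 0)) row)
    hgc n (pvZeros n) (le_of_eq hzlen.symm)
  have hclen : (pvCopyInto n base (pvZeros n)).length = n := by
    have h := HC.1
    rw [hzlen] at h
    exact h
  have hcrowlen : ∀ i, i < n → ((pvCopyInto n base (pvZeros n)).getD i []).length = n := by
    intro i hi
    rw [show (pvCopyInto n base (pvZeros n)).getD i [] = _ from HC.2 i, if_pos hi,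
      (pv_rowCopy _ n ((pvZeros n).getD i []) (le_of_eq (hzrowlen i hi).symm)).1, hzrowlen i hi]
  have hcget : ∀ i j, i < n → j < n →
      ((pvCopyInto n base (pvZeros n)).getD i []).getD j 0 = (base.getD i []).getD j 0 := by
    intro i j hi hj
    rw [show (pvCopyInto n base (pvZeros n)).getD i [] = _ from HC.2 i, if_pos hi,
      (pv_rowCopy _ n ((pvZeros n).getD i []) (le_of_eq (hzrowlen i hi).symm)).2 j, if_pos hj]
  -- the diagonal pass
  have hgd : ∀ (m : List (List Int)) (i : Nat), i < m.length →
      pvSetAt m i i 1 = m.set i ((fun i r => r.set i (1 : Int)) i (m.getD i [])) :=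
    fun m i _ => rfl
  have HD := pv_outerFold (fun m i => pvSetAt m i i 1) (fun i r => r.set i (1 : Int))
    hgd n (pvCopyInto n base (pvZeros n)) (le_of_eq hclen.symm)
  have hdlen : (pvSetDiag n (pvCopyInto n base (pvZeros n))).length = n := by
    have h := HD.1
    rw [hclen] at h
    exact h
  refine ⟨hdlen, ?_, ?_⟩
  · intro i hi
    rw [show (pvSetDiag n (pvCopyInto n base (pvZeros n))).getD i [] = _ from HD.2 i, if_pos hi]
    simp only [List.length_set]
    exact hcrowlen i hi
  · intro i j hi hj
    rw [show (pvSetDiag n (pvCopyInto n base (pvZeros n))).getD i [] = _ from HD.2 i, if_pos hi]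
    by_cases hij : i = j
    · subst hij
      rw [pv_getD_set_self _ _ _ _ (by rw [hcrowlen i hi]; exact hi), if_pos rfl]
    · rw [pv_getD_set_ne _ _ _ _ _ hij, if_neg hij]
      exact hcget i j hi hj

-- ===== the main bisimulation =====
lemma pvLoop_eq (base : List (List Int)) (n : Nat) (adj : List (List Bool))
    (hadj : ∀ i j, i < n → j < n → pvAdjGet adj i j = pvCA base i j) (fuel : Nat) :
    ∀ (ma mb : List (List Int)) (S : List Nat) (deg : List Int) (cnt : Int),
      S.Nodup → (∀ j ∈ S, j < n) →
      ma.length = n → (∀ i, i < n → (ma.getD i []).length = n) →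
      (∀ i j, i < n → j < n →
        (((ma.getD i []).getD j 0) == 1) = (pvCA base i j && S.contains j)) →
      deg.length = n →
      (∀ i, i < n → deg.getD i 0 = ((S.countP (fun j => pvCA base i j) : Nat) : Int)) →
      S.length < fuel →
      pvLoopA n fuel ma mb S cnt = pvLoopB n adj fuel deg S cnt := by
  induction fuel with
  | zero => intro ma mb S deg cnt _ _ _ _ _ _ _ hf; exact absurd hf (Nat.not_lt_zero _)
  | succ fuel IH =>
    intro ma mb S deg cnt hnd hSb hlen hrow hent hdlen hdeg hfuel
    -- grade(matrix_a, i) counts the still-live closed-adjacency columns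
    have hgrade : ∀ i, i < n →
        pvGrade ma i = ((S.countP (fun j => pvCA base i j) : Nat) : Int) := by
      intro i hi
      unfold pvGrade
      rw [hlen]
      rw [PySem.List.foldl_if_add_one, zero_add]
      rw [List.countP_congr (fun j hj => by
        rw [hent i j hi (List.mem_range.mp hj)])]
      rw [pv_countRange n S _ hnd hSb]
    -- all_zero(matrix_a) says every live degree is zero
    have hAZiff : pvAllZero ma = true ↔
        ∀ i, i < n → S.countP (fun j => pvCA base i j) = 0 := by
      unfold pvAllZero
      rw [hlen]
      simp only [List.all_eq_true, List.mem_range, Bool.not_eq_eq_eq_not, Bool.not_true]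
      constructor
      · intro h i hi
        rw [List.countP_eq_zero]
        intro j hj
        have hjn := hSb j hj
        have h2 := h i hi j hjn
        rw [hent i j hi hjn] at h2
        intro hca
        rw [hca, (pv_contains_iff S j).mpr hj] at h2
        simp at h2
      · intro h i hi j hj
        rw [hent i j hi hj]
        by_cases hjS : j ∈ S
        · have := (List.countP_eq_zero.mp (h i hi)) j hjS
          simp only [Bool.not_eq_true] at this
          rw [this, Bool.false_and]
        · have : S.contains j = false := by
            rw [← Bool.not_eq_true]; intro hc; exact hjS ((pv_contains_iff S j).mp hc)
          rw [this, Bool.and_false]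
    by_cases hAZ : pvAllZero ma = true
    · -- loop exits now on both sides
      have hz := hAZiff.mp hAZ
      rw [show pvLoopA n (fuel+1) ma mb S cnt = cnt from by simp [pvLoopA, hAZ]]
      rcases pv_upFoldChar (fun i => deg.getD i 0) n with ⟨-, heq⟩ | ⟨k, hk, h1k, -, -, -⟩
      · have hbp : pvBestPos n deg = (0, -1) := heq
        simp [pvLoopB, hbp]
      · exfalso
        have h1k' : (1 : Int) ≤ deg.getD k 0 := h1k
        rw [hdeg k hk, hz k hk] at h1k'
        simp at h1k'
    · -- one more round on both sides
      have hAZf : pvAllZero ma = false := by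
        rw [← Bool.not_eq_true]; exact hAZ
      have hex : ∃ i, i < n ∧ 0 < S.countP (fun j => pvCA base i j) := by
        by_contra h
        push Not at h
        exact hAZ (hAZiff.mpr fun i hi => by have := h i hi; omega)
      -- argmax of the two folds is the same index
      rcases pv_downFoldChar (fun i => pvGrade ma i) n 0 (-1) with ⟨hallA, -⟩ | ⟨kA, hkA, -, heqA, hleA, hltA⟩
      · exfalso
        obtain ⟨i, hi, h1⟩ := hex
        have h2 : pvGrade ma i ≤ 0 := hallA i hi
        rw [hgrade i hi] at h2
        omega
      rcases pv_upFoldChar (fun i => deg.getD i 0) n with ⟨hallB, -⟩ | ⟨kB, hkB, h1B, heqB, hleB, hltB⟩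
      · exfalso
        obtain ⟨i, hi, h1⟩ := hex
        have h2 : deg.getD i 0 < 1 := hallB i hi
        rw [hdeg i hi] at h2
        omega
      have hFA : ∀ j, j < n → pvGrade ma j = ((S.countP (fun j' => pvCA base j j') : Nat) : Int) := hgrade
      have hkk : kA = kB := by
        rcases Nat.lt_trichotomy kA kB with h | h | h
        · exfalso
          have h1 : pvGrade ma kB < pvGrade ma kA := hltA kB h hkB
          have h2 : deg.getD kA 0 ≤ deg.getD kB 0 := hleB kA hkA
          rw [hgrade kB hkB, hgrade kA hkA] at h1
          rw [hdeg kA hkA, hdeg kB hkB] at h2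
          omega
        · exact h
        · exfalso
          have h1 : deg.getD kA 0 < deg.getD kB 0 := hltB kA h hkA
          have h2 : pvGrade ma kB ≤ pvGrade ma kA := hleA kB hkB
          rw [hdeg kA hkA, hdeg kB hkB] at h1
          rw [hgrade kB hkB, hgrade kA hkA] at h2
          omega
      subst hkk
      set k := kA with hkdef
      have hkn : k < n := hkA
      have hFk : 0 < S.countP (fun j => pvCA base k j) := by
        have h1B' : (1 : Int) ≤ deg.getD k 0 := h1B
        rw [hdeg k hkn] at h1B'
        omega
      -- reduce one step of A
      have hposA : pvFindPos ma n = (pvGrade ma k, (k : Int)) := heqA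
      have hstepA : pvLoopA n (fuel+1) ma mb S cnt
          = pvLoopA n fuel (pvUpdateMa n (pvRemovalPass ma k mb S).2 ma)
              (pvRemovalPass ma k mb S).1 (pvRemovalPass ma k mb S).2 (cnt + 1) := by
        simp [pvLoopA, hAZf, hposA]
      -- reduce one step of B
      have hposB : pvBestPos n deg = (deg.getD k 0, (k : Int)) := heqB
      have hne : (((k : Int)) == (-1 : Int)) = false := by
        simp only [beq_eq_false_iff_ne]; omega
      have hstepB : pvLoopB n adj (fuel+1) deg S cnt
          = pvLoopB n adj fuel
              ((List.range n).map (fun i => deg.getD i 0 -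
                ((S.filter (fun j => pvAdjGet adj k j)).countP (fun j => pvAdjGet adj i j) : Int)))
              (S.filter (fun j => !pvAdjGet adj k j)) (cnt + 1) := by
        simp [pvLoopB, hposB, hne]
      rw [hstepA, hstepB]
      -- the removal pass = keeping the columns the chosen row does not dominate
      have hrem : (pvRemovalPass ma k mb S).2 = S.filter (fun j => !(pvCA base k j)) := by
        have h0 : (pvRemovalPass ma k mb S).2
            = S.filter (fun i => !((((ma.getD k []).getD i 0 == 1)) && S.reverse.contains i)) := by
          exact pv_removeFold (fun i => ((ma.getD k []).getD i 0 == 1)) S.reverse mb S hnd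
            (List.nodup_reverse.mpr hnd) (fun i hi => List.mem_reverse.mp hi)
        rw [h0]
        apply List.filter_congr
        intro x hx
        have hxn := hSb x hx
        have hxr : S.reverse.contains x = true :=
          (pv_contains_iff _ x).mpr (List.mem_reverse.mpr hx)
        have hxc : S.contains x = true := (pv_contains_iff S x).mpr hx
        rw [hxr, Bool.and_true, hent k x hkn hxn, hxc, Bool.and_true]
      have hremB : S.filter (fun j => !pvAdjGet adj k j) = S.filter (fun j => !(pvCA base k j)) := by
        apply List.filter_congr
        intro x hx
        rw [hadj k x hkn (hSb x hx)]
      have hremR : S.filter (fun j => pvAdjGet adj k j) = S.filter (fun j => pvCA base k j) := by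
        apply List.filter_congr
        intro x hx
        rw [hadj k x hkn (hSb x hx)]
      rw [hrem, hremB, hremR]
      set K := S.filter (fun j => !(pvCA base k j)) with hKdef
      set R := S.filter (fun j => pvCA base k j) with hRdef
      -- invariants for the next round
      have hKsub : ∀ j ∈ K, j ∈ S := fun j hj => (List.mem_filter.mp hj).1
      have hKnd : K.Nodup := hnd.filter _
      have hKb : ∀ j ∈ K, j < n := fun j hj => hSb j (hKsub j hj)
      have hKcon : ∀ j, j < n → (K.contains j = (S.contains j && !(pvCA base k j))) := by
        intro j _
        by_cases hjS : j ∈ S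
        · rw [(pv_contains_iff S j).mpr hjS, Bool.true_and]
          by_cases hca : pvCA base k j = true
          · rw [hca]
            simp only [Bool.not_true]
            rw [← Bool.not_eq_true]
            intro hc
            have := (List.mem_filter.mp ((pv_contains_iff K j).mp hc)).2
            rw [hca] at this
            simp at this
          · have hca' : pvCA base k j = false := by
              rw [← Bool.not_eq_true]; exact hca
            rw [hca']
            simp only [Bool.not_false]
            exact (pv_contains_iff K j).mpr (List.mem_filter.mpr ⟨hjS, by rw [hca']; rfl⟩)
        · have h1 : S.contains j = false := by
            rw [← Bool.not_eq_true]; intro hc; exact hjS ((pv_contains_iff S j).mp hc)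
          have h2 : K.contains j = false := by
            rw [← Bool.not_eq_true]; intro hc
            exact hjS (hKsub j ((pv_contains_iff K j).mp hc))
          rw [h1, h2, Bool.false_and]
      obtain ⟨hulen, hurow, huget⟩ := pv_updateChar K n ma hlen hrow
      have hent' : ∀ i j, i < n → j < n →
          ((((pvUpdateMa n K ma).getD i []).getD j 0) == 1) = (pvCA base i j && K.contains j) := by
        intro i j hi hj
        rw [huget i j hi hj]
        have he := hent i j hi hj
        have hKc := hKcon j hj
        by_cases h1 : ((ma.getD i []).getD j 0 == 1) = true
        · have hcm : (pvCA base i j && S.contains j) = true := by rw [← he]; exact h1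
          obtain ⟨hca, hsc⟩ : pvCA base i j = true ∧ S.contains j = true := by simpa using hcm
          by_cases h2 : K.contains j = true
          · rw [if_neg (show ¬(((ma.getD i []).getD j 0 == 1) && !(K.contains j)) = true from by
                rw [h2]; simp)]
            rw [h1, hca, h2]
            rfl
          · have h2' : K.contains j = false := by rw [← Bool.not_eq_true]; exact h2
            rw [if_pos (show (((ma.getD i []).getD j 0 == 1) && !(K.contains j)) = true from by
                rw [h1, h2']; rfl)]
            rw [h2', Bool.and_false]
            decide
        · have h1' : ((ma.getD i []).getD j 0 == 1) = false := by rw [← Bool.not_eq_true]; exact h1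
          rw [if_neg (show ¬(((ma.getD i []).getD j 0 == 1) && !(K.contains j)) = true from by
              rw [h1']; simp)]
          rw [h1', hKc, ← Bool.and_assoc, ← he, h1', Bool.false_and]
      have hdeg' : ∀ i, i < n →
          ((List.range n).map (fun i => deg.getD i 0 - (R.countP (fun j => pvAdjGet adj i j) : Int))).getD i 0
          = ((K.countP (fun j => pvCA base i j) : Nat) : Int) := by
        intro i hi
        rw [PySem.List.getD_map_range _ n i 0 hi]
        have hcntR : R.countP (fun j => pvAdjGet adj i j) = R.countP (fun j => pvCA base i j) := by
          apply List.countP_congr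
          intro j hj
          have hjn := hSb j (List.mem_filter.mp hj).1
          rw [hadj i j hi hjn]
        rw [hcntR, hdeg i hi]
        have hsplit := List.countP_eq_countP_filter_add S (fun j => pvCA base i j) (fun j => pvCA base k j)
        rw [← hRdef, ← hKdef] at hsplit
        rw [hsplit]
        push_cast
        ring
      have hdlen' : ((List.range n).map
          (fun i => deg.getD i 0 - (R.countP (fun j => pvAdjGet adj i j) : Int))).length = n := by
        simp
      -- fuel: at least one column was removed
      have hKlt : K.length < S.length := by
        apply List.length_filter_lt_length_iff_exists.mpr
        obtain ⟨j, hjS, hj⟩ := List.countP_pos_iff.mp hFk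
        exact ⟨j, hjS, by simp [hj]⟩
      exact IH (pvUpdateMa n K ma) (pvRemovalPass ma k mb S).1 K
        ((List.range n).map (fun i => deg.getD i 0 - (R.countP (fun j => pvAdjGet adj i j) : Int)))
        (cnt + 1) hKnd hKb (hulen) (hurow) hent' hdlen' hdeg' (by omega)

-- initial degrees of B
lemma pv_degInit (base : List (List Int)) (n : Nat)
    (hadj : ∀ i j, i < n → j < n → pvAdjGet (pvAdjInit base n) i j = pvCA base i j) :
    ∀ i, i < n → (pvDegInit n (pvAdjInit base n)).getD i 0
      = (((List.range n).countP (fun j => pvCA base i j) : Nat) : Int) := by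
  intro i hi
  unfold pvDegInit
  rw [PySem.List.getD_map_range _ n i 0 hi]
  have h : (List.range n).countP (fun j => pvAdjGet (pvAdjInit base n) i j)
      = (List.range n).countP (fun j => pvCA base i j) :=
    List.countP_congr (fun j hj => by rw [hadj i j hi (List.mem_range.mp hj)])
  rw [h]

-- ===== VERDICT (by name: the statement is the Claim_ definition above) =====
theorem min_dom_len_spec : Claim_equal_min_dom_len := by
  intro base _ _
  unfold Spec_min_dom_len
  simp only [min_dom_len, min_dom_len_alt]
  have hadj : ∀ i j, i < base.length → j < base.length →
      pvAdjGet (pvAdjInit base base.length) i j = pvCA base i j := by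
    intro i j hi hj
    unfold pvAdjGet pvAdjInit
    rw [PySem.List.getD_map_range _ _ i [] hi, PySem.List.getD_map_range _ _ j false hj]
    rfl
  obtain ⟨hmlen, hmrow, hmget⟩ := pv_initChar base base.length
  refine pvLoop_eq base base.length (pvAdjInit base base.length) hadj (base.length + 1)
      _ _ (List.range base.length) _ 0 List.nodup_range (fun j hj => List.mem_range.mp hj)
      hmlen hmrow ?_ (by simp [pvDegInit])
      (fun i hi => pv_degInit base base.length hadj i hi) (by simp)
  intro i j hi hj
  rw [hmget i j hi hj]
  have hc : (List.range base.length).contains j = true :=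
    (pv_contains_iff _ j).mpr (List.mem_range.mpr hj)
  rw [hc, Bool.and_true]
  unfold pvCA
  by_cases hij : i = j
  · subst hij
    rw [if_pos rfl]
    simp
  · rw [if_neg hij]
    have hb : (i == j) = false := by simp [hij]
    rw [hb, Bool.or_false]
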